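-- pv_equiv track=rewrite | github.com/Nk272/rigveda | rigveda_entity_analyzer.py | CheckMorphologicalVariations
-- ===== SOURCE A (Python) =====
-- def CheckMorphologicalVariations(word1, word2):
--     """Check for morphological variations (plurals, tenses, etc.)"""
--     # Common morphological patterns
--     patterns = [
--         (word1 + 's', word2), (word1, word2 + 's'),
--         (word1 + 'ed', word2), (word1, word2 + 'ed'),
--         (word1 + 'ing', word2), (word1, word2 + 'ing'),
--         (word1 + 'er', word2), (word1, word2 + 'er'),
--         (word1 + 'est', word2), (word1, word2 + 'est'),
--         (word1 + 'ly', word2), (word1, word2 + 'ly'),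
--     ]
--
--     for pattern1, pattern2 in patterns:
--         if pattern1 == word2 or pattern2 == word1:
--             return True
--     return False
-- ===== SOURCE B (Python) =====
-- _SUFFIXES = {'s', 'ed', 'ing', 'er', 'est', 'ly'}
--
-- def CheckMorphologicalVariations(word1, word2):
--     """Check for morphological variations (plurals, tenses, etc.)"""
--     if word1 == word2:
--         return True
--     if len(word1) == len(word2):
--         return False
--     longer, shorter = (word1, word2) if len(word1) > len(word2) else (word2, word1)
--     return longer.startswith(shorter) and longer[len(shorter):] in _SUFFIXES
-- ===== Notes on version B (the rewrite author's own statement) =====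
-- stated objective: simpler
-- what changed: Instead of building 12 concatenated pattern pairs and scanning them in a loop, B compares lengths, checks that the longer word starts with the shorter, and looks the single actual suffix difference up in a set (equal words short-circuit to True, matching A's word2 == word1 check).
import Mathlib
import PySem

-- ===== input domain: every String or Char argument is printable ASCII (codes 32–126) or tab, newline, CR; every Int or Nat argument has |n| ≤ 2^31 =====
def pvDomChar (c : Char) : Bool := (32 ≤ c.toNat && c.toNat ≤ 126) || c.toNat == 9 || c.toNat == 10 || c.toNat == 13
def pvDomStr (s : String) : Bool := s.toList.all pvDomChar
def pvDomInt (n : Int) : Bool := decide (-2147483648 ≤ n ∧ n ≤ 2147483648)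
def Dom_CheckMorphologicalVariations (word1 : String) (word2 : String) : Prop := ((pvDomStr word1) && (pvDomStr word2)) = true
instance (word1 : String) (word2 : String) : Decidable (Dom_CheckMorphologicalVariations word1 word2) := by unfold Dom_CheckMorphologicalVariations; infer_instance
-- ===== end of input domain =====

-- B replaces A's 12-pattern concatenation loop by a length compare, one prefix check and one set lookup of the suffix difference (objective: simpler).

-- ===== PORT A =====
-- A builds all 12 concatenation pairs and scans them; ported on List Char (PySem string convention).
def CheckMorphologicalVariations (word1 : String) (word2 : String) : Bool :=
  let w1 := word1.toList
  let w2 := word2.toList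
  let patterns : List (List Char × List Char) :=
    [ (w1 ++ ['s'], w2), (w1, w2 ++ ['s']),
      (w1 ++ ['e','d'], w2), (w1, w2 ++ ['e','d']),
      (w1 ++ ['i','n','g'], w2), (w1, w2 ++ ['i','n','g']),
      (w1 ++ ['e','r'], w2), (w1, w2 ++ ['e','r']),
      (w1 ++ ['e','s','t'], w2), (w1, w2 ++ ['e','s','t']),
      (w1 ++ ['l','y'], w2), (w1, w2 ++ ['l','y']) ]
  patterns.any (fun p => p.1 == w2 || p.2 == w1)

-- ===== PORT B =====
-- The Python set literal _SUFFIXES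
def pvSuffixes : PySem.Set (List Char) :=
  PySem.Set.ofList [['s'], ['e','d'], ['i','n','g'], ['e','r'], ['e','s','t'], ['l','y']]

def CheckMorphologicalVariations_alt (word1 : String) (word2 : String) : Bool :=
  let w1 := word1.toList
  let w2 := word2.toList
  if w1 == w2 then true
  else if w1.length == w2.length then false
  else
    let p := if w2.length < w1.length then (w1, w2) else (w2, w1)
    PySem.Chars.startswith p.1 p.2 &&
      decide (PySem.List.slice p.1 (some (p.2.length : Int)) none ∈ pvSuffixes)

-- ===== PRECONDITION & SPEC =====
def Spec_CheckMorphologicalVariations (word1 : String) (word2 : String) (out : Bool) : Prop := out = CheckMorphologicalVariations_alt word1 word2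
instance (word1 : String) (word2 : String) (out : Bool) : Decidable (Spec_CheckMorphologicalVariations word1 word2 out) := by unfold Spec_CheckMorphologicalVariations; infer_instance

-- ===== CLAIM (what is proved, stated in full; the proofs are below) =====
def Claim_equal_CheckMorphologicalVariations : Prop := ∀ (word1 : String) (word2 : String), Dom_CheckMorphologicalVariations word1 word2 → Spec_CheckMorphologicalVariations word1 word2 (CheckMorphologicalVariations word1 word2)

-- ===== LEMMAS AND PROOFS =====

-- w1 ++ suf = w2 exactly when w1 is a prefix of w2 and the tail after w1 is suf
theorem pv_append_eq_iff (l1 l2 suf : List Char) :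
    l1 ++ suf = l2 ↔ (l1 <+: l2 ∧ l2.drop l1.length = suf) := by
  constructor
  · rintro rfl
    exact ⟨List.prefix_append _ _, by simp⟩
  · rintro ⟨⟨t, rfl⟩, h⟩
    simp at h
    rw [h]

theorem pv_main (w1 w2 : String) :
    CheckMorphologicalVariations w1 w2 = CheckMorphologicalVariations_alt w1 w2 := by
  unfold CheckMorphologicalVariations CheckMorphologicalVariations_alt
  dsimp only
  generalize w1.toList = l1
  generalize w2.toList = l2
  rw [Bool.eq_iff_iff]
  by_cases heq : l1 = l2
  · subst heq; simp
  · by_cases hlen : l1.length = l2.length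
    · simp only [List.any_cons, List.any_nil, Bool.or_eq_true, beq_iff_eq,
        if_neg (by simpa using heq), if_pos (by simpa using hlen)]
      constructor
      · rintro (⟨h | h⟩ | ⟨h | h⟩ | ⟨h | h⟩ | ⟨h | h⟩ | ⟨h | h⟩ | ⟨h | h⟩ |
          ⟨h | h⟩ | ⟨h | h⟩ | ⟨h | h⟩ | ⟨h | h⟩ | ⟨h | h⟩ | ⟨h | h⟩ | h) <;>
          first
          | exact absurd h Bool.false_ne_true
          | exact absurd h.symm heq
          | exact absurd h heq
          | (exfalso; have := congrArg List.length h; simp at this; omega)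
      · intro h; simp at h
    · by_cases hlt : l2.length < l1.length
      · -- l1 is longer: only l2 ++ suf = l1 patterns can fire
        simp only [List.any_cons, List.any_nil, Bool.or_eq_true, beq_iff_eq,
          if_neg (by simpa using heq), if_neg (by simpa using hlen), if_pos hlt,
          Bool.and_eq_true, decide_eq_true_eq, PySem.Chars.startswith_iff,
          PySem.List.slice_from_natCast, pvSuffixes, PySem.Set.mem_ofList]
      -- rewrite each l2 ++ suf = l1 via the prefix characterisation; kill l1 ++ suf = l2 by length
        constructor
        · rintro (⟨h | h⟩ | ⟨h | h⟩ | ⟨h | h⟩ | ⟨h | h⟩ | ⟨h | h⟩ | ⟨h | h⟩ |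
            ⟨h | h⟩ | ⟨h | h⟩ | ⟨h | h⟩ | ⟨h | h⟩ | ⟨h | h⟩ | ⟨h | h⟩ | h) <;>
            first
            | exact absurd h Bool.false_ne_true
            | exact absurd h.symm heq
            | exact absurd h heq
            | (exfalso; have := congrArg List.length h; simp at this; omega)
            | (rw [pv_append_eq_iff] at h; exact ⟨h.1, by simp [h.2]⟩)
        · rintro ⟨hp, hm⟩
          simp only [List.mem_cons, List.not_mem_nil, or_false] at hm
          rcases hm with h | h | h | h | h | h <;>
            [ exact Or.inr (Or.inl (Or.inr ((pv_append_eq_iff _ _ _).2 ⟨hp, h⟩)));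
              exact Or.inr (Or.inr (Or.inr (Or.inl (Or.inr ((pv_append_eq_iff _ _ _).2 ⟨hp, h⟩)))));
              exact Or.inr (Or.inr (Or.inr (Or.inr (Or.inr (Or.inl (Or.inr ((pv_append_eq_iff _ _ _).2 ⟨hp, h⟩)))))));
              exact Or.inr (Or.inr (Or.inr (Or.inr (Or.inr (Or.inr (Or.inr (Or.inl (Or.inr ((pv_append_eq_iff _ _ _).2 ⟨hp, h⟩)))))))));
              exact Or.inr (Or.inr (Or.inr (Or.inr (Or.inr (Or.inr (Or.inr (Or.inr (Or.inr (Or.inl (Or.inr ((pv_append_eq_iff _ _ _).2 ⟨hp, h⟩)))))))))));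
              exact Or.inr (Or.inr (Or.inr (Or.inr (Or.inr (Or.inr (Or.inr (Or.inr (Or.inr (Or.inr (Or.inr (Or.inl (Or.inr ((pv_append_eq_iff _ _ _).2 ⟨hp, h⟩)))))))))))))]
      · -- l2 is longer
        simp only [List.any_cons, List.any_nil, Bool.or_eq_true, beq_iff_eq,
          if_neg (by simpa using heq), if_neg (by simpa using hlen), if_neg hlt,
          Bool.and_eq_true, decide_eq_true_eq, PySem.Chars.startswith_iff,
          PySem.List.slice_from_natCast, pvSuffixes, PySem.Set.mem_ofList]
        constructor
        · rintro (⟨h | h⟩ | ⟨h | h⟩ | ⟨h | h⟩ | ⟨h | h⟩ | ⟨h | h⟩ | ⟨h | h⟩ |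
            ⟨h | h⟩ | ⟨h | h⟩ | ⟨h | h⟩ | ⟨h | h⟩ | ⟨h | h⟩ | ⟨h | h⟩ | h) <;>
            first
            | exact absurd h Bool.false_ne_true
            | exact absurd h.symm heq
            | exact absurd h heq
            | (exfalso; have := congrArg List.length h; simp at this; omega)
            | (rw [pv_append_eq_iff] at h; exact ⟨h.1, by simp [h.2]⟩)
        · rintro ⟨hp, hm⟩
          simp only [List.mem_cons, List.not_mem_nil, or_false] at hm
          rcases hm with h | h | h | h | h | h <;>
            [ exact Or.inl (Or.inl ((pv_append_eq_iff _ _ _).2 ⟨hp, h⟩));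
              exact Or.inr (Or.inr (Or.inl (Or.inl ((pv_append_eq_iff _ _ _).2 ⟨hp, h⟩))));
              exact Or.inr (Or.inr (Or.inr (Or.inr (Or.inl (Or.inl ((pv_append_eq_iff _ _ _).2 ⟨hp, h⟩))))));
              exact Or.inr (Or.inr (Or.inr (Or.inr (Or.inr (Or.inr (Or.inl (Or.inl ((pv_append_eq_iff _ _ _).2 ⟨hp, h⟩))))))));
              exact Or.inr (Or.inr (Or.inr (Or.inr (Or.inr (Or.inr (Or.inr (Or.inr (Or.inl (Or.inl ((pv_append_eq_iff _ _ _).2 ⟨hp, h⟩))))))))));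
              exact Or.inr (Or.inr (Or.inr (Or.inr (Or.inr (Or.inr (Or.inr (Or.inr (Or.inr (Or.inr (Or.inl (Or.inl ((pv_append_eq_iff _ _ _).2 ⟨hp, h⟩))))))))))))]

-- ===== VERDICT (by name: the statement is the Claim_ definition above) =====
theorem CheckMorphologicalVariations_spec : Claim_equal_CheckMorphologicalVariations := by
  intro w1 w2 _
  unfold Spec_CheckMorphologicalVariations
  exact pv_main w1 w2
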